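-- pv_equiv track=rewrite | github.com/detectivel/gitlab_docker_mgmt | gitlab_projects.py | _inflate_to_latest_patch
-- ===== SOURCE A (Python) =====
-- from typing import Any, Iterable
--
-- def _v(ver: str) -> tuple[int, int, int]:
--     """Convert '16.0.10' -> (16, 0, 10) for numeric sorting."""
--     a, b, c = ver.split(".")
--     return int(a), int(b), int(c)
--
-- def _all_versions_from_metadata(metadata: dict[str, Any]) -> list[str]:
--     """Extract the sorted list of known releases from the metadata."""
--     versions = metadata.get("all")
--     if not isinstance(versions, Iterable):
--         raise ValueError("path.json is missing the 'all' version list")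
--     cleaned: list[str] = []
--     for item in versions:
--         if isinstance(item, str):
--             cleaned.append(item)
--     cleaned.sort(key=_v)
--     if not cleaned:
--         raise ValueError("empty versions list from path.json")
--     return cleaned
--
-- def _group_by_major_minor(all_versions: list[str]) -> dict[int, dict[int, list[str]]]:
--     by_mm: dict[int, dict[int, list[str]]] = {}
--     for v in all_versions:
--         a, b, c = map(int, v.split("."))
--         by_mm.setdefault(a, {}).setdefault(b, []).append(v)
--
--     # сортируем каждый список по патчу
--     for maj in by_mm:
--         for minr in by_mm[maj]:
--             by_mm[maj][minr].sort(key=lambda s: int(s.split(".")[2]))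
--     return by_mm
--
-- def _latest_patch(by_mm: dict[int, dict[int, list[str]]], maj: int, minr: int) -> str | None:
--     arr = by_mm.get(maj, {}).get(minr)
--     return arr[-1] if arr else None
--
-- def _inflate_to_latest_patch(steps: list[str], metadata: dict[str, Any]) -> list[str]:
--     if all(isinstance(s, str) and len(s.split(".")) == 3 for s in steps):
--         return steps
--
--     versions = metadata.get("all")
--     if not isinstance(versions, Iterable):
--         return steps
--
--     all_versions = _all_versions_from_metadata(metadata)
--     by_mm = _group_by_major_minor(all_versions)
--     inflated: list[str] = []
--     for s in steps:
--         parts = s.split(".")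
--         if len(parts) == 2:
--             maj, minr = map(int, parts)
--             latest = _latest_patch(by_mm, maj, minr)
--             if latest:
--                 inflated.append(latest)
--         else:
--             inflated.append(s)
--     return inflated
-- ===== SOURCE B (Python) =====
-- from typing import Any, Iterable
--
-- def _v(ver: str) -> tuple[int, int, int]:
--     """Convert '16.0.10' -> (16, 0, 10) for numeric sorting."""
--     a, b, c = ver.split(".")
--     return int(a), int(b), int(c)
--
-- def _all_versions_from_metadata(metadata: dict[str, Any]) -> list[str]:
--     """Extract the sorted list of known releases from the metadata."""
--     versions = metadata.get("all")
--     if not isinstance(versions, Iterable):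
--         raise ValueError("path.json is missing the 'all' version list")
--     cleaned: list[str] = []
--     for item in versions:
--         if isinstance(item, str):
--             cleaned.append(item)
--     cleaned.sort(key=_v)
--     if not cleaned:
--         raise ValueError("empty versions list from path.json")
--     return cleaned
--
-- def _inflate_to_latest_patch(steps: list[str], metadata: dict[str, Any]) -> list[str]:
--     if all(isinstance(s, str) and len(s.split(".")) == 3 for s in steps):
--         return steps
--
--     versions = metadata.get("all")
--     if not isinstance(versions, Iterable):
--         return steps
--
--     all_versions = _all_versions_from_metadata(metadata)
--     inflated: list[str] = []
--     for s in steps: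
--         parts = s.split(".")
--         if len(parts) == 2:
--             maj, minr = map(int, parts)
--             latest = None
--             for v in all_versions:
--                 a, b, _ = _v(v)
--                 if a == maj and b == minr:
--                     latest = v
--             if latest is not None:
--                 inflated.append(latest)
--         else:
--             inflated.append(s)
--     return inflated
-- ===== Notes on version B (the rewrite author's own statement) =====
-- stated objective: simpler
-- what changed: Drops _group_by_major_minor/_latest_patch entirely: instead of building a nested dict index of patch-sorted groups and looking up arr[-1], B scans the (already tuple-sorted) version list once per two-part step and keeps the last major.minor match, which is exactly the latest patch.
import Mathlib
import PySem

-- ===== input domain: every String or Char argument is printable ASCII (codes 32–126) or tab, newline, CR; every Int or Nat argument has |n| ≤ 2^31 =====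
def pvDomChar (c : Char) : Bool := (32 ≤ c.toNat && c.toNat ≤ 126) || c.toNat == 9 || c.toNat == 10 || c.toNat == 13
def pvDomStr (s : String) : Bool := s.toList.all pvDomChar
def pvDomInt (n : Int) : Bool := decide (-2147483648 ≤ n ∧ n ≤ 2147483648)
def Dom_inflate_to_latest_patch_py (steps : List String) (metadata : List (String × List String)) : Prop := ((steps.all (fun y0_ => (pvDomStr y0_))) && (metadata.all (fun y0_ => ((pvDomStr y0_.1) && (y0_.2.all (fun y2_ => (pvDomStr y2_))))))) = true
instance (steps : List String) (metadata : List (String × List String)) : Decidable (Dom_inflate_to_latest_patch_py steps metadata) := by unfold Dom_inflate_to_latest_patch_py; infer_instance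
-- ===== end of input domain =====

-- B replaces A's nested-dict index (_group_by_major_minor/_latest_patch) with a direct
-- scan of the sorted version list per two-part step, keeping the last major.minor match: simpler.


-- ===== PORT A =====
-- _v: 'a, b, c = ver.split(".")' raises ValueError unless exactly 3 int-parseable parts;
-- those inputs are outside Pre_, the port returns defaults there.
def v_py (ver : String) : Int × Int × Int :=
  match PySem.Chars.splitOn ver.toList ['.'] with
  | [a, b, c] => ((PySem.Int.ofChars? a).getD 0, (PySem.Int.ofChars? b).getD 0, (PySem.Int.ofChars? c).getD 0)
  | _ => (0, 0, 0)

-- _all_versions_from_metadata (shared helper of both Pythons). Under the declared type every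
-- item of versions is a str, so the isinstance filter keeps everything: cleaned = versions.
-- cleaned.sort(key=_v) — Python's stable sort with a 3-tuple key, ported exactly as a stable
-- sort by the 3rd component followed by a stable lexicographic sort on the 1st/2nd components.
-- 'if not cleaned: raise ValueError' is outside Pre_; the port returns the (empty) list there.
def all_versions_from_metadata_py (metadata : List (String × List String)) : List String :=
  let versions := (PySem.Dict.ofList metadata).getD "all" []
  PySem.List.sorted2 (PySem.List.sorted versions (fun v => (v_py v).2.2))
    (fun v => (v_py v).1) (fun v => (v_py v).2.1)

-- by_mm.setdefault(a, {}).setdefault(b, []).append(v)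
def mmStep (d : PySem.Dict Int (PySem.Dict Int (List String))) (v : String) :
    PySem.Dict Int (PySem.Dict Int (List String)) :=
  d.modify (v_py v).1 PySem.Dict.empty
    (fun inner => inner.modify (v_py v).2.1 [] (fun arr => arr ++ [v]))

-- by_mm[maj][minr].sort(key=lambda s: int(s.split(".")[2]))
def sortStep (d : PySem.Dict Int (PySem.Dict Int (List String))) (a b : Int) :
    PySem.Dict Int (PySem.Dict Int (List String)) :=
  d.modify a PySem.Dict.empty
    (fun inner => inner.modify b [] (fun arr => PySem.List.sorted arr (fun s => (v_py s).2.2)))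

def group_by_major_minor_py (all_versions : List String) :
    PySem.Dict Int (PySem.Dict Int (List String)) :=
  let by_mm := all_versions.foldl mmStep PySem.Dict.empty
  by_mm.keys.foldl
    (fun d a => ((d.getD a PySem.Dict.empty).keys).foldl (fun d2 b => sortStep d2 a b) d) by_mm

-- _latest_patch: 'arr[-1] if arr else None'
def latest_patch_py (by_mm : PySem.Dict Int (PySem.Dict Int (List String))) (maj minr : Int) :
    Option String :=
  match (by_mm.getD maj PySem.Dict.empty).get? minr with
  | none => none
  | some arr => if arr = [] then none else arr.getLast?

def inflate_to_latest_patch_py (steps : List String) (metadata : List (String × List String)) : List String :=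
  if steps.all (fun s => (PySem.Chars.splitOn s.toList ['.']).length == 3) then steps
  else
    match (PySem.Dict.ofList metadata).get? "all" with
    | none => steps   -- versions is None: not Iterable
    | some _ =>
      let all_versions := all_versions_from_metadata_py metadata
      let by_mm := group_by_major_minor_py all_versions
      steps.foldl (fun inflated s =>
        let parts := PySem.Chars.splitOn s.toList ['.']
        if parts.length == 2 then
          let maj := (PySem.Int.ofChars? (parts.getD 0 [])).getD 0   -- int(); ValueError outside Pre_
          let minr := (PySem.Int.ofChars? (parts.getD 1 [])).getD 0
          match latest_patch_py by_mm maj minr with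
          | some t => if t.toList = [] then inflated else inflated ++ [t]   -- 'if latest:' truthiness
          | none => inflated
        else inflated ++ [s]) []

-- ===== PORT B =====
def inflate_to_latest_patch_py_alt (steps : List String) (metadata : List (String × List String)) : List String :=
  if steps.all (fun s => (PySem.Chars.splitOn s.toList ['.']).length == 3) then steps
  else
    match (PySem.Dict.ofList metadata).get? "all" with
    | none => steps
    | some _ =>
      let all_versions := all_versions_from_metadata_py metadata
      steps.foldl (fun inflated s =>
        let parts := PySem.Chars.splitOn s.toList ['.']
        if parts.length == 2 then
          let maj := (PySem.Int.ofChars? (parts.getD 0 [])).getD 0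
          let minr := (PySem.Int.ofChars? (parts.getD 1 [])).getD 0
          match all_versions.foldl (fun latest v =>
              if (v_py v).1 == maj && (v_py v).2.1 == minr then some v else latest) none with
          | some t => inflated ++ [t]
          | none => inflated
        else inflated ++ [s]) []

-- ===== PRECONDITION & SPEC =====
-- Pre_ excludes exactly the inputs on which A raises ValueError: it is only restrictive when the
-- version list is actually consulted (some step lacks 3 parts and metadata has an "all" list), and
-- then requires the list to be nonempty with every version of the form int.int.int (else _v / the
-- sort raises) and every two-part step to have int-parseable parts (else map(int, parts) raises).
def validVerB (v : String) : Bool :=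
  match PySem.Chars.splitOn v.toList ['.'] with
  | [a, b, c] => (PySem.Int.ofChars? a).isSome && (PySem.Int.ofChars? b).isSome && (PySem.Int.ofChars? c).isSome
  | _ => false

def stepOKB (s : String) : Bool :=
  let parts := PySem.Chars.splitOn s.toList ['.']
  if parts.length == 2 then
    (PySem.Int.ofChars? (parts.getD 0 [])).isSome && (PySem.Int.ofChars? (parts.getD 1 [])).isSome
  else true

def Pre_inflate_to_latest_patch_py (steps : List String) (metadata : List (String × List String)) : Prop :=
  (steps.all (fun s => (PySem.Chars.splitOn s.toList ['.']).length == 3)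
    || (match (PySem.Dict.ofList metadata).get? "all" with
        | none => true
        | some versions => !versions.isEmpty && versions.all validVerB && steps.all stepOKB)) = true

instance (steps : List String) (metadata : List (String × List String)) : Decidable (Pre_inflate_to_latest_patch_py steps metadata) := by unfold Pre_inflate_to_latest_patch_py; infer_instance

def pvWitness_inflate_to_latest_patch_py : List String × (List (String × List String)) :=
  (["16.0", "17.1.2", "16.3"], [("all", ["16.0.1", "16.3.0", "16.0.7", "16.0.3"])])

def Spec_inflate_to_latest_patch_py (steps : List String) (metadata : List (String × List String)) (out : List String) : Prop := out = inflate_to_latest_patch_py_alt steps metadata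
instance (steps : List String) (metadata : List (String × List String)) (out : List String) : Decidable (Spec_inflate_to_latest_patch_py steps metadata out) := by unfold Spec_inflate_to_latest_patch_py; infer_instance

-- ===== CLAIM (what is proved, stated in full; the proofs are below) =====
def Claim_equal_inflate_to_latest_patch_py : Prop := ∀ (steps : List String) (metadata : List (String × List String)), Dom_inflate_to_latest_patch_py steps metadata → Pre_inflate_to_latest_patch_py steps metadata → Spec_inflate_to_latest_patch_py steps metadata (inflate_to_latest_patch_py steps metadata)

-- ===== LEMMAS AND PROOFS =====

-- Proof-only helpers
def kC (v : String) : Int := (v_py v).2.2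

def sortedV (versions : List String) : List String :=
  PySem.List.sorted2 (PySem.List.sorted versions (fun v => (v_py v).2.2))
    (fun v => (v_py v).1) (fun v => (v_py v).2.1)

def pAB (a b : Int) (v : String) : Bool := (v_py v).1 == a && (v_py v).2.1 == b

def lookup2D (d : PySem.Dict Int (PySem.Dict Int (List String))) (a b : Int) : List String :=
  (d.getD a PySem.Dict.empty).getD b []

def SortedInv (d0 d : PySem.Dict Int (PySem.Dict Int (List String))) : Prop :=
  ∀ a b, lookup2D d a b = lookup2D d0 a b ∨
    lookup2D d a b = PySem.List.sorted (lookup2D d0 a b) (fun s => (v_py s).2.2)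

-- lexicographic 2-tuple comparison: sorted2 is sorted with a Lex pair key
theorem pv_lt_lex (k1a k1b k2a k2b : Int) :
    (decide (k1a < k1b) || !decide (k1b < k1a) && decide (k2a < k2b))
      = decide ((toLex ((k1a, k2a) : Int × Int)) < toLex (k1b, k2b)) := by
  by_cases h1 : k1a < k1b <;> by_cases h2 : k1b < k1a <;> by_cases h3 : k2a < k2b <;>
    simp [h1, h2, h3, Prod.Lex.lt_iff] <;> omega

theorem pv_sorted2_eq_sorted_lex {α : Type} (xs : List α) (k1 k2 : α → Int) :
    PySem.List.sorted2 xs k1 k2 = PySem.List.sorted xs (fun x => toLex ((k1 x, k2 x) : Int × Int)) := by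
  simp only [PySem.List.sorted2, PySem.List.sorted]
  norm_num
  congr 1
  funext acc x
  congr 1
  funext a b
  exact pv_lt_lex _ _ _ _

-- stability of Python's insertion sort on elements whose key is one fixed value
theorem pv_insertBy_pairwise {α κ : Type} [LinearOrder κ] (key : α → κ) (x : α) (acc : List α)
    (h : acc.Pairwise (fun a b => key a ≤ key b)) :
    (PySem.List.insertBy (fun a b => decide (key a < key b)) x acc).Pairwise (fun a b => key a ≤ key b) := by
  induction acc with
  | nil => simp [PySem.List.insertBy]
  | cons y ys ih =>
    rw [List.pairwise_cons] at h
    by_cases hlt : key x < key y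
    · simp only [PySem.List.insertBy, hlt, decide_true, if_true]
      refine List.pairwise_cons.mpr ⟨?_, List.pairwise_cons.mpr ⟨h.1, h.2⟩⟩
      intro z hz
      rcases List.mem_cons.mp hz with rfl | hz
      · exact le_of_lt hlt
      · exact le_trans (le_of_lt hlt) (h.1 z hz)
    · simp only [PySem.List.insertBy, hlt, decide_false, Bool.false_eq_true, if_false]
      refine List.pairwise_cons.mpr ⟨?_, ih h.2⟩
      intro z hz
      rcases (PySem.List.mem_insertBy _ x z ys).mp hz with rfl | hz
      · exact le_of_not_gt hlt
      · exact h.1 z hz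

theorem pv_insertBy_filter {α κ : Type} [LinearOrder κ] (key : α → κ) (p : α → Bool) (k : κ)
    (hp : ∀ a, p a = true → key a = k) (x : α) (acc : List α)
    (h : acc.Pairwise (fun a b => key a ≤ key b)) :
    (PySem.List.insertBy (fun a b => decide (key a < key b)) x acc).filter p
      = if p x then acc.filter p ++ [x] else acc.filter p := by
  induction acc with
  | nil => cases hx : p x <;> simp [PySem.List.insertBy, List.filter, hx]
  | cons y ys ih =>
    rw [List.pairwise_cons] at h
    by_cases hlt : key x < key y
    · simp only [PySem.List.insertBy, hlt, decide_true, if_true]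
      cases hx : p x with
      | false => simp [List.filter_cons, hx]
      | true =>
        have hempty : (y :: ys).filter p = [] := by
          rw [List.filter_eq_nil_iff]
          intro z hz hpz
          have hzk : key z = k := hp z hpz
          have hxk : key x = k := hp x hx
          rcases List.mem_cons.mp hz with rfl | hz
          · rw [hzk, hxk] at hlt; exact absurd hlt (lt_irrefl k)
          · have h2 : key y ≤ key z := h.1 z hz
            rw [hzk] at h2
            rw [hxk] at hlt
            exact absurd (lt_of_lt_of_le hlt h2) (lt_irrefl k)
        rw [List.filter_cons, hempty]
        simp [hx]
    · simp only [PySem.List.insertBy, hlt, decide_false, Bool.false_eq_true, if_false]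
      rw [List.filter_cons, List.filter_cons, ih h.2]
      cases hx : p x <;> cases hy : p y <;> simp

theorem pv_isort_filter_aux {α κ : Type} [LinearOrder κ] (key : α → κ) (p : α → Bool) (k : κ)
    (hp : ∀ a, p a = true → key a = k) (xs : List α) :
    ∀ acc : List α, acc.Pairwise (fun a b => key a ≤ key b) →
      (xs.foldl (fun acc x => PySem.List.insertBy (fun a b => decide (key a < key b)) x acc) acc).filter p
        = acc.filter p ++ xs.filter p := by
  induction xs with
  | nil => intro acc _; simp
  | cons x xs ih =>
    intro acc hacc
    rw [List.foldl_cons, ih _ (pv_insertBy_pairwise key x acc hacc),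
        pv_insertBy_filter key p k hp x acc hacc, List.filter_cons]
    cases hx : p x <;> simp

theorem pv_sorted_filter_const {α κ : Type} [LinearOrder κ] (key : α → κ) (p : α → Bool) (k : κ)
    (hp : ∀ a, p a = true → key a = k) (xs : List α) :
    (PySem.List.sorted xs key).filter p = xs.filter p := by
  rw [PySem.List.sorted_eq_foldl_insertBy]
  simpa using pv_isort_filter_aux key p k hp xs [] List.Pairwise.nil

-- the nested-dict index, characterised by lookups
theorem pv_lookup2D_mmStep (d : PySem.Dict Int (PySem.Dict Int (List String))) (v : String) (a b : Int) :
    lookup2D (mmStep d v) a b = lookup2D d a b ++ (if pAB a b v then [v] else []) := by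
  unfold lookup2D mmStep pAB
  simp only [PySem.Dict.modify]
  rw [PySem.Dict.getD_insert]
  by_cases h1 : a = (v_py v).1
  · subst h1
    rw [if_pos rfl, PySem.Dict.getD_insert]
    by_cases h2 : b = (v_py v).2.1
    · subst h2
      rw [if_pos rfl]
      simp
    · rw [if_neg h2]
      have hb : ((v_py v).2.1 == b) = false :=
        beq_eq_false_iff_ne.mpr (fun hh => h2 hh.symm)
      simp [hb]
  · rw [if_neg h1]
    have ha : ((v_py v).1 == a) = false :=
      beq_eq_false_iff_ne.mpr (fun hh => h1 hh.symm)
    simp [ha]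

theorem pv_lookup2D_foldl_mm (L : List String) :
    ∀ d a b, lookup2D (L.foldl mmStep d) a b = lookup2D d a b ++ L.filter (pAB a b) := by
  induction L with
  | nil => intro d a b; simp
  | cons v L ih =>
    intro d a b
    rw [List.foldl_cons, ih, pv_lookup2D_mmStep, List.filter_cons]
    cases h : pAB a b v <;> simp [h]

theorem pv_lookup2D_empty (a b : Int) : lookup2D PySem.Dict.empty a b = [] := by
  simp [lookup2D, PySem.Dict.empty, PySem.Dict.getD, PySem.Dict.get?]

theorem pv_lookup2D_sortStep (d : PySem.Dict Int (PySem.Dict Int (List String))) (a0 b0 a b : Int) :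
    lookup2D (sortStep d a0 b0) a b
      = if a = a0 ∧ b = b0 then PySem.List.sorted (lookup2D d a0 b0) (fun s => (v_py s).2.2)
        else lookup2D d a b := by
  unfold lookup2D sortStep
  simp only [PySem.Dict.modify]
  rw [PySem.Dict.getD_insert]
  by_cases h1 : a = a0
  · subst h1
    rw [if_pos rfl, PySem.Dict.getD_insert]
    by_cases h2 : b = b0
    · subst h2
      simp
    · simp [h2]
  · rw [if_neg h1]
    simp [h1]

theorem pv_inv_sortStep {d0 d : PySem.Dict Int (PySem.Dict Int (List String))}
    (h : SortedInv d0 d) (a0 b0 : Int) : SortedInv d0 (sortStep d a0 b0) := by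
  intro a b
  rw [pv_lookup2D_sortStep]
  by_cases hab : a = a0 ∧ b = b0
  · rw [if_pos hab]
    obtain ⟨rfl, rfl⟩ := hab
    rcases h a b with h' | h' <;> rw [h']
    · right; rfl
    · right; exact PySem.List.sorted_sorted _ _
  · rw [if_neg hab]; exact h a b

theorem pv_inv_inner (a0 : Int) (bs : List Int) :
    ∀ {d0 d}, SortedInv d0 d → SortedInv d0 (bs.foldl (fun d2 b => sortStep d2 a0 b) d) := by
  induction bs with
  | nil => intro _ _ h; exact h
  | cons b bs ih => intro d0 d h; exact ih (pv_inv_sortStep h a0 b)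

theorem pv_inv_outer (as : List Int) :
    ∀ {d0 d}, SortedInv d0 d →
      SortedInv d0 (as.foldl
        (fun d' a => ((d'.getD a PySem.Dict.empty).keys).foldl (fun d2 b => sortStep d2 a b) d') d) := by
  induction as with
  | nil => intro _ _ h; exact h
  | cons a as ih => intro d0 d h; exact ih (pv_inv_inner a _ h)

-- B's scan keeps the last match
theorem pv_getLast?_cons_or {α : Type} (v : α) (t : List α) :
    (v :: t).getLast? = t.getLast?.or (some v) := by
  cases t with
  | nil => rfl
  | cons w t' =>
    rw [List.getLast?_cons_cons]
    exact (Option.or_of_isSome (List.getLast?_isSome.mpr (by simp))).symm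

theorem pv_scan_ab (a b : Int) (L : List String) :
    ∀ acc, L.foldl (fun latest v => if (v_py v).1 == a && (v_py v).2.1 == b then some v else latest) acc
      = ((L.filter (pAB a b)).getLast?).or acc := by
  induction L with
  | nil => intro acc; simp
  | cons v L ih =>
    intro acc
    rw [List.foldl_cons, List.filter_cons]
    cases hv : pAB a b v with
    | false =>
      have hv' : ((v_py v).1 == a && (v_py v).2.1 == b) = false := hv
      rw [hv']
      simp only [Bool.false_eq_true, if_false]
      exact ih acc
    | true =>
      have hv' : ((v_py v).1 == a && (v_py v).2.1 == b) = true := hv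
      rw [hv']
      simp only [if_true]
      rw [ih (some v), pv_getLast?_cons_or, Option.or_assoc]
      simp

-- _latest_patch as a total lookup: missing key and empty list both give None
theorem pv_latest_lookup (d : PySem.Dict Int (PySem.Dict Int (List String))) (a b : Int) :
    latest_patch_py d a b
      = (if lookup2D d a b = [] then none else (lookup2D d a b).getLast?) := by
  unfold latest_patch_py
  have hrfl : lookup2D d a b = ((d.getD a PySem.Dict.empty).get? b).getD [] := rfl
  cases hget : (d.getD a PySem.Dict.empty).get? b with
  | none =>
    rw [hrfl, hget]
    rfl
  | some arr =>
    rw [hrfl, hget]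
    by_cases he : arr = [] <;> simp [he]

-- the crux: A's index lookup equals the last match in the sorted list
theorem pv_latest_eq (versions : List String) (a b : Int) :
    latest_patch_py (group_by_major_minor_py (sortedV versions)) a b
      = ((sortedV versions).filter (pAB a b)).getLast? := by
  have hp : ∀ v, pAB a b v = true →
      (fun x => toLex (((v_py x).1, (v_py x).2.1) : Int × Int)) v = toLex ((a, b) : Int × Int) := by
    intro v hv
    rcases (Bool.and_eq_true _ _).mp hv with ⟨h1, h2⟩
    simp only
    rw [beq_iff_eq.mp h1, beq_iff_eq.mp h2]
  have hx : (sortedV versions).filter (pAB a b)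
      = (PySem.List.sorted versions (fun v => (v_py v).2.2)).filter (pAB a b) := by
    unfold sortedV
    rw [pv_sorted2_eq_sorted_lex]
    exact pv_sorted_filter_const _ (pAB a b) (toLex ((a, b) : Int × Int)) hp _
  have hpw : ((sortedV versions).filter (pAB a b)).Pairwise
      (fun u w => (v_py u).2.2 ≤ (v_py w).2.2) := by
    rw [hx]
    exact (PySem.List.sorted_pairwise versions (fun v => (v_py v).2.2)).sublist List.filter_sublist
  have hsid : PySem.List.sorted ((sortedV versions).filter (pAB a b)) (fun s => (v_py s).2.2)
      = (sortedV versions).filter (pAB a b) :=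
    PySem.List.sorted_eq_self_of_pairwise _ _ hpw
  have h1 : lookup2D ((sortedV versions).foldl mmStep PySem.Dict.empty) a b
      = (sortedV versions).filter (pAB a b) := by
    rw [pv_lookup2D_foldl_mm, pv_lookup2D_empty]
    rfl
  have h2 : lookup2D (group_by_major_minor_py (sortedV versions)) a b
      = (sortedV versions).filter (pAB a b) := by
    unfold group_by_major_minor_py
    have hinv := pv_inv_outer ((sortedV versions).foldl mmStep PySem.Dict.empty).keys
      (d0 := (sortedV versions).foldl mmStep PySem.Dict.empty)
      (d := (sortedV versions).foldl mmStep PySem.Dict.empty) (fun _ _ => Or.inl rfl)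
    rcases hinv a b with h' | h'
    · rw [h', h1]
    · rw [h', h1, hsid]
  rw [pv_latest_lookup, h2]
  by_cases he : (sortedV versions).filter (pAB a b) = []
  · rw [if_pos he, he]
    rfl
  · rw [if_neg he]

-- a version string accepted by _v is nonempty
theorem pv_valid_ne_nil (t : String) (h : validVerB t = true) : t.toList ≠ [] := by
  intro hnil
  unfold validVerB at h
  rw [hnil] at h
  have : PySem.Chars.splitOn ([] : List Char) ['.'] = [[]] := by decide
  rw [this] at h
  simp at h

theorem pv_mem_sortedV (versions : List String) (t : String) (h : t ∈ sortedV versions) :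
    t ∈ versions := by
  unfold sortedV at h
  have h2 := (PySem.List.sorted2_perm _ _ _ _).mem_iff.mp h
  exact (PySem.List.mem_sorted _ _ _ _).mp h2

-- ===== VERDICT (by name: the statement is the Claim_ definition above) =====
theorem inflate_to_latest_patch_py_spec : Claim_equal_inflate_to_latest_patch_py := by
  intro steps metadata _hdom hpre
  unfold Spec_inflate_to_latest_patch_py
  unfold inflate_to_latest_patch_py inflate_to_latest_patch_py_alt
  by_cases hall : (steps.all (fun s => (PySem.Chars.splitOn s.toList ['.']).length == 3)) = true
  · rw [if_pos hall, if_pos hall]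
  · rw [if_neg hall, if_neg hall]
    unfold Pre_inflate_to_latest_patch_py at hpre
    rcases (Bool.or_eq_true _ _).mp hpre with h | hm
    · exact absurd h hall
    cases hget : (PySem.Dict.ofList metadata).get? "all" with
    | none => simp only [hget]
    | some versions =>
      simp only [hget]
      rw [hget] at hm
      have hvalid : ∀ v ∈ versions, validVerB v = true := by
        rcases (Bool.and_eq_true _ _).mp hm with ⟨h1, _⟩
        rcases (Bool.and_eq_true _ _).mp h1 with ⟨_, h2⟩
        exact fun v hv => List.all_eq_true.mp h2 v hv
      have hav : all_versions_from_metadata_py metadata = sortedV versions := by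
        unfold all_versions_from_metadata_py sortedV
        simp only [PySem.Dict.getD]
        rw [hget]
        rfl
      rw [hav]
      apply PySem.List.foldl_congr_mem
      intro acc s _hs
      by_cases hp2 : ((PySem.Chars.splitOn s.toList ['.']).length == 2) = true
      · simp only [hp2, if_true]
        rw [pv_latest_eq versions _ _, pv_scan_ab]
        cases hlast : ((sortedV versions).filter
            (pAB ((PySem.Int.ofChars? ((PySem.Chars.splitOn s.toList ['.']).getD 0 [])).getD 0)
                 ((PySem.Int.ofChars? ((PySem.Chars.splitOn s.toList ['.']).getD 1 [])).getD 0))).getLast? with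
        | none => rfl
        | some t =>
          have ht : t ∈ versions :=
            pv_mem_sortedV versions t
              (List.mem_of_mem_filter (List.mem_of_getLast? hlast))
          have hne : t.toList ≠ [] := pv_valid_ne_nil t (hvalid t ht)
          simp [hne]
      · simp only [hp2]
        simp
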